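-- pv_equiv track=rewrite | github.com/kopish/pythonProject1 | Starter/Lesson6/Lesson6Home4.py | diapazon
-- ===== SOURCE A (Python) =====
-- def diapazon(a, b):
--     while True:
--         if b == a:
--             return b
--         elif b % 2 == 0:
--             return b * diapazon(a, b - 1)
--         else:
--             b -= 1
-- ===== SOURCE B (Python) =====
-- def diapazon(a, b):
--     prod = a
--     for k in range(a // 2 + 1, b // 2 + 1):
--         prod *= 2 * k
--     return prod
-- ===== Notes on version B (the rewrite author's own statement) =====
-- stated objective: alternative
-- what changed: Instead of A's one-recursive-frame-per-step descent from b to a, B iterates a single for-loop over the halved range a//2+1..b//2, multiplying each even number 2*k onto an accumulator initialised to a.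
import Mathlib
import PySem

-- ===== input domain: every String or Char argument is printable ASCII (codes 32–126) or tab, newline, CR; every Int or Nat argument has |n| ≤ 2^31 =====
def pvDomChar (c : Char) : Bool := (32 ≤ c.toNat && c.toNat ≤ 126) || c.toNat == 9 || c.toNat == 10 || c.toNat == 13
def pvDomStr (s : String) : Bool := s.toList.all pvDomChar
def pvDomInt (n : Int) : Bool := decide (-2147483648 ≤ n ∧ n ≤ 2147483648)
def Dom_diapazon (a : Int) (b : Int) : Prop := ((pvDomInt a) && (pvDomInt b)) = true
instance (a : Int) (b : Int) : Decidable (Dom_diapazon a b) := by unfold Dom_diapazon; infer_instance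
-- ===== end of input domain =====

-- B computes A's value (a times the product of the even numbers in (a,b]) by a single
-- for-loop over the halved range a//2+1 .. b//2, instead of A's one-frame-per-step recursion.


-- ===== PORT A =====
-- A's recursion with fuel (b-a).toNat: each step (recursive call or b -= 1) lowers b by 1,
-- so for a ≤ b the fuel is exactly enough and fuel 0 means b = a (A's base case).
def diapazonGo (a : Int) (b : Int) : Nat → Int
  | 0 => b
  | n + 1 =>
    if b = a then b
    else if PySem.Int.mod b 2 = 0 then b * diapazonGo a (b - 1) n
    else diapazonGo a (b - 1) n

def diapazon (a : Int) (b : Int) : Int := diapazonGo a b (b - a).toNat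

-- ===== PORT B =====
-- for k in range(a//2+1, b//2+1): prod *= 2*k   (prod starts at a)
def diapazon_alt (a : Int) (b : Int) : Int :=
  (PySem.List.pyRange (PySem.Int.floordiv a 2 + 1) (PySem.Int.floordiv b 2 + 1) 1).foldl
    (fun prod k => prod * (2 * k)) a

-- ===== PRECONDITION & SPEC =====
-- For b < a, A recurses forever (RecursionError): excluded.  (B's loop body is never entered there.)
def Pre_diapazon (a : Int) (b : Int) : Prop := a ≤ b
instance (a : Int) (b : Int) : Decidable (Pre_diapazon a b) := by unfold Pre_diapazon; infer_instance
def pvWitness_diapazon : Int × Int := (2, 9)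

def Spec_diapazon (a : Int) (b : Int) (out : Int) : Prop := out = diapazon_alt a b
instance (a : Int) (b : Int) (out : Int) : Decidable (Spec_diapazon a b out) := by unfold Spec_diapazon; infer_instance

-- ===== CLAIM =====
def Claim_equal_diapazon : Prop := ∀ (a : Int) (b : Int), Dom_diapazon a b → Pre_diapazon a b → Spec_diapazon a b (diapazon a b)

-- ===== LEMMAS AND PROOFS =====
theorem foldl_mul_snoc (f : Int → Int) (l : List Int) (x : Int) (init : Int) :
    (l ++ [x]).foldl (fun p k => p * f k) init = (l.foldl (fun p k => p * f k) init) * f x := by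
  simp [List.foldl_append]

theorem go_eq (a : Int) (n : Nat) : ∀ b : Int, a ≤ b → (b - a).toNat = n → diapazonGo a b n = diapazon_alt a b := by
  induction n with
  | zero =>
    intro b hab h
    have hba : b = a := by omega
    subst hba
    simp [diapazonGo, diapazon_alt, PySem.List.pyRange_one_eq_nil (le_refl _)]
  | succ n ih =>
    intro b hab h
    have hne : b ≠ a := by omega
    have h' : (b - 1 - a).toNat = n := by omega
    simp only [diapazonGo, if_neg hne]
    rw [ih (b - 1) (by omega) h']
    have e2 : (0:Int) < 2 := by omega
    unfold diapazon_alt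
    rw [PySem.Int.floordiv_eq_ediv_of_pos e2, PySem.Int.floordiv_eq_ediv_of_pos e2,
        PySem.Int.floordiv_eq_ediv_of_pos e2]
    by_cases hm : PySem.Int.mod b 2 = 0
    · rw [if_pos hm]
      rw [PySem.Int.mod_eq_emod_of_pos e2] at hm
      have hle : a / 2 + 1 ≤ b / 2 := by omega
      have hb2 : (b - 1) / 2 + 1 = b / 2 := by omega
      rw [hb2]
      rw [PySem.List.pyRange_one_succ_right hle, foldl_mul_snoc (fun k => 2 * k)]
      have h2b : 2 * (b / 2) = b := by omega
      rw [h2b]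
      ring
    · rw [if_neg hm]
      rw [PySem.Int.mod_eq_emod_of_pos e2] at hm
      have hb2 : (b - 1) / 2 = b / 2 := by omega
      rw [hb2]

-- ===== VERDICT =====
theorem diapazon_spec : Claim_equal_diapazon := by
  intro a b _ hpre
  unfold Spec_diapazon diapazon
  exact go_eq a _ b hpre rfl
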